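-- pv_equiv track=rewrite | github.com/PhilippB4/codewars | python/6 kyu/Make A Window.py | make_a_window
-- ===== SOURCE A (Python) =====
-- def make_a_window(num):
--     # your code here
--     window_part = ''
--     for x in range(num):
--         dots = '.' * num
--         window_part += f'|{dots}|{dots}|\n'
--     dashes = '-' * num
--     middle = f'|{dashes}+{dashes}|\n'
--     dashes_outside = '-' * (num*2+3)
--     return f'{dashes_outside}\n{window_part}{middle}{window_part}{dashes_outside}'
-- ===== SOURCE B (Python) =====
-- def make_a_window(num):
--     size = 2 * num + 3
--     w = size + 1  # row stride: size cells plus the newline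
--     buf = bytearray((b'.' * size + b'\n') * size)
--     for c in (0, num + 1, size - 1):          # paint the three vertical frame lines
--         buf[c::w] = b'|' * size
--     for r in (0, size - 1):                   # paint top and bottom borders
--         buf[r * w:r * w + size] = b'-' * size
--     m = (num + 1) * w                         # paint the horizontal middle line
--     buf[m + 1:m + size - 1] = b'-' * (size - 2)
--     buf[m + num + 1] = ord('+')               # the centre cross
--     return buf[:-1].decode()
-- ===== Notes on version B (the rewrite author's own statement) =====
-- stated objective: alternative
-- what changed: Replaces A's line-assembly (a string-concatenation loop over prebuilt rows) with canvas painting: allocate a dot-filled byte canvas of the whole window and paint the three vertical frame lines by strided slice assignment and the border/middle rows by slice assignment.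
-- intended difference: For num = -1 (a window of negative size, an unspecified corner) A returns the leftover fragment '-\n|+|\n-' from multiplying strings by a negative count, while B's collapsed 1x1 canvas yields '+'; both are degenerate and B's is an equally valid value for an invalid size. — e.g. on make_a_window(-1): A returns "-\n|+|\n-", B returns "+"
-- outside the precondition, e.g. on make_a_window(-2): A returns '\n|+|\n', B raises ValueError; on make_a_window(-3): A returns '\n|+|\n', B raises IndexError
import Mathlib
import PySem

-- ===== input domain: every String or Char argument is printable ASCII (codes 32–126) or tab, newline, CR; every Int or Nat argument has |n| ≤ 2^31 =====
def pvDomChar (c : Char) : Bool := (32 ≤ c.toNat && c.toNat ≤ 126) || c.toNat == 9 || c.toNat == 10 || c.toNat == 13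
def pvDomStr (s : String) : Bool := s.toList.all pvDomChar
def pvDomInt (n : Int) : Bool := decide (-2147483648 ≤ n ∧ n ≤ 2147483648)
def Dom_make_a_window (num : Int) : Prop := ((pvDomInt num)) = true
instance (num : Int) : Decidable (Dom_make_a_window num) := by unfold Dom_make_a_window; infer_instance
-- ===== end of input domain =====

-- B paints the window onto a flat byte canvas (dots first, then frame columns by strided assignment, then
-- border and middle rows by slice assignment) instead of A's per-line string-concatenation loop
-- (objective: alternative); for num = -1 the two return different degenerate values — see D_ below.

-- ===== PORT A =====
-- loop: window_part += f'|{dots}|{dots}|\n' for each x in range(num)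
def make_a_window (num : Int) : String :=
  let dots := PySem.List.pyRepeat ['.'] num
  let window_part := (PySem.List.pyRange 0 num 1).foldl
    (fun acc _ => acc ++ ('|' :: dots ++ '|' :: dots ++ ['|', '\n'])) ([] : List Char)
  let dashes := PySem.List.pyRepeat ['-'] num
  let middle := '|' :: dashes ++ '+' :: dashes ++ ['|', '\n']
  let dashes_outside := PySem.List.pyRepeat ['-'] (num * 2 + 3)
  String.ofList (dashes_outside ++ '\n' :: (window_part ++ middle ++ window_part ++ dashes_outside))

-- ===== PORT B =====
-- buf[i::step] = seg  (exact when len(seg) matches the strided positions and they are in range — true on Pre_)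
def pvAssignStride : List Char → Nat → Nat → List Char → List Char
  | buf, _, _, [] => buf
  | buf, i, step, v :: rest => pvAssignStride (buf.set i v) (i + step) step rest

-- buf[a:b] = seg  (exact for 0 ≤ a, 0 ≤ b — true for every call on Pre_)
def pvAssignSlice (buf : List Char) (a b : Int) (seg : List Char) : List Char :=
  let a' := min a.toNat buf.length
  let b' := max a' (min b.toNat buf.length)
  buf.take a' ++ seg ++ buf.drop b'

def make_a_window_alt (num : Int) : String :=
  let size := 2 * num + 3
  let w := size + 1
  let buf0 := PySem.List.pyRepeat (PySem.List.pyRepeat ['.'] size ++ ['\n']) size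
  let bar := PySem.List.pyRepeat ['|'] size
  let buf1 := [0, num + 1, size - 1].foldl (fun b c => pvAssignStride b c.toNat w.toNat bar) buf0
  let dash := PySem.List.pyRepeat ['-'] size
  let buf2 := [0, size - 1].foldl (fun b r => pvAssignSlice b (r * w) (r * w + size) dash) buf1
  let m := (num + 1) * w
  let buf3 := pvAssignSlice buf2 (m + 1) (m + size - 1) (PySem.List.slice dash none (some (size - 2)))
  let buf4 := buf3.set (m + num + 1).toNat '+'
  String.ofList buf4.dropLast  -- del buf[-1], then str

-- ===== PRECONDITION & SPEC =====
-- Pre_ excludes num ≤ -2: there A still returns leftover frame fragments from negative string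
-- multiplication, but B's byte-canvas construction itself raises (zero slice step / index on an empty canvas).
def Pre_make_a_window (num : Int) : Prop := -1 ≤ num
instance (num : Int) : Decidable (Pre_make_a_window num) := by unfold Pre_make_a_window; infer_instance
def pvWitness_make_a_window : Int := 0
-- For num = -1 (a window of negative size, an unspecified corner) A returns the leftover fragment
-- '-\n|+|\n-' from multiplying strings by a negative count, while B's collapsed 1x1 canvas yields '+';
-- both are degenerate and B's is an equally valid value for an invalid size.
def D_make_a_window (num : Int) : Prop := num = -1
instance (num : Int) : Decidable (D_make_a_window num) := by unfold D_make_a_window; infer_instance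
def Spec_make_a_window (num : Int) (out : String) : Prop := ¬ D_make_a_window num → out = make_a_window_alt num
instance (num : Int) (out : String) : Decidable (Spec_make_a_window num out) := by unfold Spec_make_a_window; infer_instance
def pvDiffWitness_make_a_window : Int := (-1)
def pvDiffWitnessOut_make_a_window : String × String := ("-\n|+|\n-", "+")

-- ===== CLAIM (what is proved, stated in full; the proofs are below) =====
def Claim_unchanged_make_a_window : Prop := ∀ (num : Int), Dom_make_a_window num → Pre_make_a_window num → Spec_make_a_window num (make_a_window num)
def Claim_changed_make_a_window : Prop := Dom_make_a_window (pvDiffWitness_make_a_window) ∧ Pre_make_a_window (pvDiffWitness_make_a_window) ∧ D_make_a_window (pvDiffWitness_make_a_window) ∧ make_a_window (pvDiffWitness_make_a_window) = pvDiffWitnessOut_make_a_window.1 ∧ make_a_window_alt (pvDiffWitness_make_a_window) = pvDiffWitnessOut_make_a_window.2 ∧ pvDiffWitnessOut_make_a_window.1 ≠ pvDiffWitnessOut_make_a_window.2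
def Claim_exact_make_a_window : Prop := ∀ (num : Int), Dom_make_a_window num → Pre_make_a_window num → D_make_a_window num → make_a_window num ≠ make_a_window_alt num

-- ===== LEMMAS AND PROOFS =====

-- proof-side row constants
def pvVLine (n : Nat) : List Char := '|' :: List.replicate n '.' ++ '|' :: List.replicate n '.' ++ ['|']
def pvRowV (n : Nat) : List Char := pvVLine n ++ ['\n']
def pvMid (n : Nat) : List Char := '|' :: List.replicate n '-' ++ '+' :: List.replicate n '-' ++ ['|']

theorem pv_rowV_length (n : Nat) : (pvRowV n).length = 2 * n + 4 := by
  simp [pvRowV, pvVLine]; omega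

theorem pv_stride_shift (pre : List Char) : ∀ (seg buf : List Char) (i step : Nat),
    pvAssignStride (pre ++ buf) (pre.length + i) step seg = pre ++ pvAssignStride buf i step seg := by
  intro seg
  induction seg with
  | nil => intro buf i step; rfl
  | cons v vs ih =>
    intro buf i step
    show pvAssignStride ((pre ++ buf).set (pre.length + i) v) (pre.length + i + step) step vs = _
    rw [List.set_append, if_neg (by omega)]
    have : pre.length + i - pre.length = i := by omega
    rw [this, show pre.length + i + step = pre.length + (i + step) by omega, ih]
    rfl

theorem pv_zipWith_replicate (f : List Char → Char → List Char) (v : Char) :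
    ∀ (rows : List (List Char)), List.zipWith f rows (List.replicate rows.length v) = rows.map (fun r => f r v) := by
  intro rows
  induction rows with
  | nil => rfl
  | cons r rs ih => simp [List.replicate_succ, ih]

theorem pv_stride_rows (w : Nat) : ∀ (rows : List (List Char)) (seg : List Char) (c : Nat),
    seg.length = rows.length → (∀ row ∈ rows, row.length = w) → c < w →
    pvAssignStride rows.flatten c w seg = (List.zipWith (fun row v => row.set c v) rows seg).flatten := by
  intro rows
  induction rows with
  | nil => intro seg c hlen _ _; simp at hlen; simp [hlen]; rfl
  | cons row rest ih =>
    intro seg c hlen hw hc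
    match seg with
    | [] => simp at hlen
    | v :: vs =>
      have hrl : row.length = w := hw row (by simp)
      show pvAssignStride ((row ++ rest.flatten).set c v) (c + w) w vs = _
      rw [List.set_append, if_pos (by omega)]
      have h2 : (row.set c v).length = w := by simp [hrl]
      rw [show c + w = (row.set c v).length + c by omega, pv_stride_shift,
        ih vs c (by simpa using hlen) (fun r hr => hw r (by simp [hr])) hc]
      simp

-- a stride with a constant bar over identical rows
theorem pv_stride_replicate (w k : Nat) (row : List Char) (c : Nat) (hrl : row.length = w) (hc : c < w) :
    pvAssignStride (List.replicate k row).flatten c w (List.replicate k '|') =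
      (List.replicate k (row.set c '|')).flatten := by
  rw [pv_stride_rows w (List.replicate k row) _ c (by simp)
    (fun r hr => by rw [List.eq_of_mem_replicate hr]; exact hrl) hc]
  congr 1
  rw [show (List.replicate k '|') = List.replicate (List.replicate k row).length '|' by simp,
    pv_zipWith_replicate]
  simp [List.map_replicate]

theorem pv_set_mid (l1 : List Char) (x : Char) (l2 : List Char) (v : Char) :
    (l1 ++ x :: l2).set l1.length v = l1 ++ v :: l2 := by
  rw [List.set_append, if_neg (by omega)]
  simp

theorem pv_set_rep (l : List Char) (c x v : Char) (k : Nat) :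
    (List.replicate k c ++ x :: l).set k v = List.replicate k c ++ v :: l := by
  have := pv_set_mid (List.replicate k c) x l v
  simpa using this

-- the dot row after painting the three vertical bars
theorem pv_rowV_eq (n : Nat) :
    ((((List.replicate (2*n+3) '.' ++ ['\n']).set 0 '|').set (n+1) '|').set (2*n+2) '|') = pvRowV n := by
  have hsplit : List.replicate (2*n+3) '.' ++ ['\n'] = '.' :: (List.replicate n '.' ++ '.' :: (List.replicate n '.' ++ ['.', '\n'])) := by
    have hrot : '.' :: List.replicate n '.' = List.replicate n '.' ++ ['.'] := by
      rw [← List.replicate_succ, List.replicate_succ']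
    rw [show 2*n+3 = 1 + (n + (1 + (n + 1))) by omega]
    simp [List.replicate_add, List.replicate_succ, hrot]
  rw [hsplit]
  have h0 : ('.' :: (List.replicate n '.' ++ '.' :: (List.replicate n '.' ++ ['.', '\n']))).set 0 '|'
      = '|' :: (List.replicate n '.' ++ '.' :: (List.replicate n '.' ++ ['.', '\n'])) := rfl
  rw [h0, List.set_cons_succ, pv_set_rep]
  rw [show 2*n+2 = (2*n+1)+1 by omega, List.set_cons_succ, List.set_append, if_neg (by simp; omega)]
  simp only [List.length_replicate, show 2*n+1 - n = n+1 from by omega, List.set_cons_succ, pv_set_rep]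
  simp [pvRowV, pvVLine]

theorem pv_slice_shift (pre buf : List Char) (a b : Nat) (seg : List Char) :
    pvAssignSlice (pre ++ buf) ((pre.length + a : Nat) : Int) ((pre.length + b : Nat) : Int) seg =
      pre ++ pvAssignSlice buf (a : Int) (b : Int) seg := by
  unfold pvAssignSlice
  simp only [Int.toNat_natCast, List.length_append]
  rw [show min (pre.length + a) (pre.length + buf.length) = pre.length + min a buf.length by omega,
    show max (pre.length + min a buf.length) (min (pre.length + b) (pre.length + buf.length))
      = pre.length + max (min a buf.length) (min b buf.length) by omega,
    List.take_append, List.drop_append]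
  rw [List.take_of_length_le (by omega), List.drop_eq_nil_of_le (by omega)]
  simp

theorem pv_set_shift (pre buf : List Char) (i : Nat) (v : Char) :
    (pre ++ buf).set (pre.length + i) v = pre ++ buf.set i v := by
  rw [List.set_append, if_neg (by omega)]
  simp

theorem pv_vline_length (n : Nat) : (pvVLine n).length = 2*n+3 := by
  simp [pvVLine]; omega

theorem pv_rowV_drop (n : Nat) : (pvRowV n).drop (2*n+3) = ['\n'] := by
  rw [pvRowV, show 2*n+3 = (pvVLine n).length from (pv_vline_length n).symm, List.drop_left]

theorem pv_slice_generic (buf : List Char) (a b : Nat) (seg : List Char)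
    (hb : a ≤ b) (hble : b ≤ buf.length) :
    pvAssignSlice buf ((a : Nat) : Int) ((b : Nat) : Int) seg = buf.take a ++ seg ++ buf.drop b := by
  unfold pvAssignSlice
  simp only [Int.toNat_natCast]
  rw [show min a buf.length = a by omega, show max a (min b buf.length) = b by omega]

theorem pv_mid_assign (n : Nat) (rest : List Char) :
    pvAssignSlice (pvRowV n ++ rest) ((1 : Nat) : Int) ((2*n+2 : Nat) : Int) (List.replicate (2*n+1) '-') =
      ('|' :: List.replicate (2*n+1) '-' ++ ['|', '\n']) ++ rest := by
  have hshape : pvRowV n ++ rest = ('|' :: (List.replicate n '.' ++ '|' :: List.replicate n '.')) ++ (['|', '\n'] ++ rest) := by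
    simp [pvRowV, pvVLine]
  have hlen : ('|' :: (List.replicate n '.' ++ '|' :: List.replicate n '.')).length = 2*n+2 := by
    simp; omega
  rw [pv_slice_generic _ _ _ _ (by omega) (by simp [pvRowV, pvVLine]; omega), hshape,
    show (2*n+2) = ('|' :: (List.replicate n '.' ++ '|' :: List.replicate n '.')).length from hlen.symm,
    List.drop_left]
  simp [List.take_append]


theorem pv_flat_single (k : Nat) (a : Char) : (List.replicate k [a]).flatten = List.replicate k a := by
  induction k with
  | zero => rfl
  | succ m ih => simp [List.replicate_succ, ih]

theorem pv_border_assign (n : Nat) (rest : List Char) :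
    pvAssignSlice (pvRowV n ++ rest) ((0 : Nat) : Int) ((2*n+3 : Nat) : Int) (List.replicate (2*n+3) '-') =
      List.replicate (2*n+3) '-' ++ '\n' :: rest := by
  rw [pv_slice_generic _ _ _ _ (by omega) (by simp [pv_rowV_length]; omega),
    List.drop_append_of_le_length (by rw [pv_rowV_length]; omega), pv_rowV_drop]
  simp

theorem pv_set_mid_row (n : Nat) (rest : List Char) :
    (('|' :: List.replicate (2*n+1) '-' ++ ['|', '\n']) ++ rest).set (n+1) '+' =
      (pvMid n ++ ['\n']) ++ rest := by
  have hsplit : List.replicate (2*n+1) '-' = List.replicate n '-' ++ '-' :: List.replicate n '-' := by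
    rw [show 2*n+1 = n + (n+1) by omega, List.replicate_add, List.replicate_succ]
  rw [List.set_append, if_pos (by simp; omega), hsplit]
  have : ('|' :: ((List.replicate n '-' ++ '-' :: List.replicate n '-') ++ ['|', '\n'])).set (n+1) '+'
      = '|' :: ((List.replicate n '-' ++ '-' :: (List.replicate n '-' ++ ['|', '\n']))).set n '+' := by
    simp [List.set_cons_succ]
  simp only [List.cons_append, this, pv_set_rep]
  simp [pvMid]

theorem pv_B_val (n : Nat) :
    make_a_window_alt (n : Int) = String.ofList
      (List.replicate (2*n+3) '-' ++ '\n' :: ((List.replicate n (pvRowV n)).flatten ++ (pvMid n ++ ['\n']) ++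
        (List.replicate n (pvRowV n)).flatten ++ List.replicate (2*n+3) '-')) := by
  unfold make_a_window_alt
  dsimp only
  simp only [List.foldl_cons, List.foldl_nil, PySem.List.pyRepeat]
  rw [show (2*(n:Int)+3) = ((2*n+3 : Nat) : Int) by push_cast; ring]
  rw [show (((2*n+3 : Nat) : Int)+1) = ((2*n+4 : Nat) : Int) by push_cast; ring]
  rw [show (((2*n+3 : Nat) : Int)-1) = ((2*n+2 : Nat) : Int) by push_cast; ring]
  rw [show ((n:Int)+1) = ((n+1 : Nat) : Int) by push_cast; ring]
  simp only [Int.toNat_natCast, Int.toNat_zero, pv_flat_single]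
  -- the three vertical strides paint rowD into pvRowV, row by row
  have hrowD : (List.replicate (2*n+3) '.' ++ ['\n']).length = 2*n+4 := by simp
  rw [pv_stride_replicate (2*n+4) (2*n+3) _ 0 hrowD (by omega),
    pv_stride_replicate (2*n+4) (2*n+3) _ (n+1) (by simp [hrowD]) (by omega),
    pv_stride_replicate (2*n+4) (2*n+3) _ (2*n+2) (by simp [hrowD]) (by omega),
    pv_rowV_eq]
  -- top border
  rw [show (0 * ((2*n+4 : Nat) : Int)) = ((0 : Nat) : Int) by push_cast; ring,
    show (((0:Nat) : Int) + ((2*n+3 : Nat) : Int)) = ((2*n+3 : Nat) : Int) by push_cast; ring,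
    show (List.replicate (2*n+3) (pvRowV n)).flatten = pvRowV n ++ (List.replicate (2*n+2) (pvRowV n)).flatten
      from by rw [List.replicate_succ]; simp,
    pv_border_assign]
  -- bottom border
  have hpre1 : (List.replicate (2*n+3) '-' ++ '\n' :: (List.replicate (2*n+1) (pvRowV n)).flatten).length
      = (2*n+2)*(2*n+4) := by
    simp [pv_rowV_length]; ring
  rw [show (List.replicate (2*n+2) (pvRowV n)).flatten
        = (List.replicate (2*n+1) (pvRowV n)).flatten ++ pvRowV n
      from by rw [List.replicate_succ']; simp,
    show List.replicate (2*n+3) '-' ++ '\n' :: ((List.replicate (2*n+1) (pvRowV n)).flatten ++ pvRowV n)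
        = (List.replicate (2*n+3) '-' ++ '\n' :: (List.replicate (2*n+1) (pvRowV n)).flatten) ++ pvRowV n
      from by simp,
    show (((2*n+2 : Nat) : Int) * ((2*n+4 : Nat) : Int))
        = (((List.replicate (2*n+3) '-' ++ '\n' :: (List.replicate (2*n+1) (pvRowV n)).flatten).length + 0 : Nat) : Int)
      from by rw [hpre1]; push_cast; ring,
    show ((((List.replicate (2*n+3) '-' ++ '\n' :: (List.replicate (2*n+1) (pvRowV n)).flatten).length + 0 : Nat) : Int) + ((2*n+3 : Nat) : Int))
        = (((List.replicate (2*n+3) '-' ++ '\n' :: (List.replicate (2*n+1) (pvRowV n)).flatten).length + (2*n+3) : Nat) : Int)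
      from by push_cast; ring,
    pv_slice_shift,
    show pvAssignSlice (pvRowV n) ((0 : Nat) : Int) ((2*n+3 : Nat) : Int) (List.replicate (2*n+3) '-')
        = List.replicate (2*n+3) '-' ++ ['\n'] from by simpa using pv_border_assign n []]
  -- the middle line
  have hpre2 : (List.replicate (2*n+3) '-' ++ '\n' :: (List.replicate n (pvRowV n)).flatten).length
      = (n+1)*(2*n+4) := by
    simp [pv_rowV_length]; ring
  rw [show (((2*n+3 : Nat) : Int) - 2) = ((2*n+1 : Nat) : Int) by push_cast; ring]
  rw [PySem.List.slice_to_natCast, List.take_replicate,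
    show min (2*n+1) (2*n+3) = 2*n+1 by omega]
  rw [show (List.replicate (2*n+1) (pvRowV n)).flatten
        = (List.replicate n (pvRowV n)).flatten ++ (pvRowV n ++ (List.replicate n (pvRowV n)).flatten)
      from by rw [show 2*n+1 = n + (1 + n) by omega, List.replicate_add, List.replicate_add]; simp]
  rw [show List.replicate (2*n+3) '-' ++
        '\n' :: ((List.replicate n (pvRowV n)).flatten ++ (pvRowV n ++ (List.replicate n (pvRowV n)).flatten)) ++
        (List.replicate (2*n+3) '-' ++ ['\n'])
      = (List.replicate (2*n+3) '-' ++ '\n' :: (List.replicate n (pvRowV n)).flatten) ++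
        (pvRowV n ++ ((List.replicate n (pvRowV n)).flatten ++ (List.replicate (2*n+3) '-' ++ ['\n'])))
      from by simp]
  rw [show (((n+1 : Nat) : Int) * ((2*n+4 : Nat) : Int) + 1)
      = (((List.replicate (2*n+3) '-' ++ '\n' :: (List.replicate n (pvRowV n)).flatten).length + 1 : Nat) : Int)
      from by rw [hpre2]; push_cast; ring]
  rw [show (((n+1 : Nat) : Int) * ((2*n+4 : Nat) : Int) + ((2*n+3 : Nat) : Int) - 1)
      = (((List.replicate (2*n+3) '-' ++ '\n' :: (List.replicate n (pvRowV n)).flatten).length + (2*n+2) : Nat) : Int)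
      from by rw [hpre2]; push_cast; ring]
  rw [pv_slice_shift, pv_mid_assign]
  -- the centre '+'
  rw [show (((n+1 : Nat) : Int) * ((2*n+4 : Nat) : Int) + (n : Int) + 1).toNat
      = (List.replicate (2*n+3) '-' ++ '\n' :: (List.replicate n (pvRowV n)).flatten).length + (n+1)
      from by
        rw [hpre2, show ((n+1 : Nat) : Int) * ((2*n+4 : Nat) : Int) = (((n+1)*(2*n+4) : Nat) : Int) by push_cast; ring]
        omega]
  rw [pv_set_shift, pv_set_mid_row]
  rw [show List.replicate (2*n+3) '-' ++ '\n' :: (List.replicate n (pvRowV n)).flatten ++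
          (pvMid n ++ ['\n'] ++ ((List.replicate n (pvRowV n)).flatten ++ (List.replicate (2*n+3) '-' ++ ['\n'])))
      = (List.replicate (2*n+3) '-' ++ '\n' :: ((List.replicate n (pvRowV n)).flatten ++ (pvMid n ++ ['\n']) ++
          (List.replicate n (pvRowV n)).flatten ++ List.replicate (2*n+3) '-')) ++ ['\n']
      from by simp, List.dropLast_concat]

theorem pv_flatMap_const' {α β : Type} (c : List β) (l : List α) :
    l.flatMap (fun _ => c) = (List.replicate l.length c).flatten := by
  induction l with
  | nil => rfl
  | cons x xs ih => simp [List.flatMap_cons, List.replicate_succ, ih]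

theorem pv_A_val (n : Nat) :
    make_a_window (n : Int) = String.ofList
      (List.replicate (2*n+3) '-' ++ '\n' :: ((List.replicate n (pvRowV n)).flatten ++ (pvMid n ++ ['\n']) ++
        (List.replicate n (pvRowV n)).flatten ++ List.replicate (2*n+3) '-')) := by
  unfold make_a_window
  dsimp only
  simp only [PySem.List.foldl_append_eq_flatMap, List.nil_append, pv_flatMap_const',
    PySem.List.length_pyRange_one, PySem.List.pyRepeat_singleton]
  rw [show ((n : Int) - 0).toNat = n by omega, show ((n : Int)).toNat = n by omega,
    show ((n : Int) * 2 + 3).toNat = 2*n+3 by omega]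
  congr 1
  simp [pvRowV, pvVLine, pvMid]

theorem make_a_window_eq (num : Int) (h : 0 ≤ num) : make_a_window num = make_a_window_alt num := by
  obtain ⟨n, rfl⟩ := Int.eq_ofNat_of_zero_le h
  rw [pv_A_val, pv_B_val]


-- ===== VERDICT (by name: the statement is the Claim_ definition above) =====
theorem make_a_window_spec : Claim_unchanged_make_a_window := by
  intro num _ hpre hnd
  exact make_a_window_eq num
    (by unfold Pre_make_a_window at hpre; unfold D_make_a_window at hnd; omega)

theorem make_a_window_changed : Claim_changed_make_a_window := by
  unfold Claim_changed_make_a_window; decide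

theorem make_a_window_tight : Claim_exact_make_a_window := by
  intro num _ _ hd
  unfold D_make_a_window at hd
  subst hd
  decide
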